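-- pv_equiv track=rewrite | github.com/8luerose/Coding-test | Algorithm_python/section_7/17_pizza_delivery(DFS).py | select_pizza
-- ===== SOURCE A (Python) =====
-- from itertools import combinations
--
-- def select_pizza(pizza_map, m):
--     n = len(pizza_map)
--     pizza_list = []
--     for i in range(n):
--         for j in range(n):
--             if pizza_map[i][j] == 2:
--                 pizza_list.append((i, j))
--     pizza_combinations = list(combinations(pizza_list, m))
--     return pizza_combinations
-- ===== SOURCE B (Python) =====
-- def select_pizza(pizza_map, m):
--     n = len(pizza_map)
--     cells = [(i, j) for i in range(n) for j in range(n) if pizza_map[i][j] == 2]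
--
--     def build(rest, chosen):
--         if len(chosen) == m:
--             return [tuple(chosen)]
--         if len(rest) < m - len(chosen):
--             return []
--         return build(rest[1:], chosen + [rest[0]]) + build(rest[1:], chosen)
--
--     return build(cells, [])
-- ===== Notes on version B (the rewrite author's own statement) =====
-- stated objective: alternative
-- what changed: Replaces the itertools.combinations library call with a hand-written take/skip recursion that accumulates the chosen cells (pruning suffixes too short to complete a combination) and collects the pizza cells with a single comprehension instead of nested append loops.
import Mathlib
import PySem

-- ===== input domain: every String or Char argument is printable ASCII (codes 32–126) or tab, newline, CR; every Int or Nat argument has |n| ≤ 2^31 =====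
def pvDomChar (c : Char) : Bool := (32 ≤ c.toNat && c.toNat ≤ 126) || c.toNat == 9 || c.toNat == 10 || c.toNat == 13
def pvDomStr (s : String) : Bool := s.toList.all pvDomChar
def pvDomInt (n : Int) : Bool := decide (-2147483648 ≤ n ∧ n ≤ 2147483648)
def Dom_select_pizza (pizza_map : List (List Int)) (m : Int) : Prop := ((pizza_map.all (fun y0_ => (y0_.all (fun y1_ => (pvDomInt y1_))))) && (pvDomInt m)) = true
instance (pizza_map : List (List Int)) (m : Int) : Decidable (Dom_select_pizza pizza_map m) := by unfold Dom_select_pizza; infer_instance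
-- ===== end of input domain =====

-- B replaces the itertools.combinations call by a hand-written take/skip recursion with an
-- accumulator and suffix-length pruning (objective: alternative; not faster, itertools is C code).

-- ===== PORT A =====
-- port of list(itertools.combinations(xs, k)) for a nonnegative integer k:
-- the standard recursive characterisation (same lexicographic-by-index order)
def combosA {α : Type} : Nat → List α → List (List α)
  | 0, _ => [[]]
  | _ + 1, [] => []
  | k + 1, x :: xs => (combosA k xs).map (fun c => x :: c) ++ combosA (k + 1) xs

def select_pizza (pizza_map : List (List Int)) (m : Int) : List (List (Int × Int)) :=
  let n : Int := pizza_map.length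
  let pizza_list : List (Int × Int) :=
    (PySem.List.pyRange 0 n 1).foldl (fun acc i =>
      (PySem.List.pyRange 0 n 1).foldl (fun acc2 j =>
        if PySem.List.pyGetD (PySem.List.pyGetD pizza_map i []) j 0 = 2
        then acc2 ++ [(i, j)] else acc2) acc) []
  combosA m.toNat pizza_list  -- m ≥ 0 under Pre_ (combinations raises ValueError for m < 0)

-- ===== PORT B =====
-- build(rest, chosen): emit when m cells are chosen; prune suffixes too short to finish;
-- otherwise take or skip the head (the [] fallthrough is Python's IndexError, only m < 0 reaches it)
def buildB (m : Int) (rest chosen : List (Int × Int)) : List (List (Int × Int)) :=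
  if (chosen.length : Int) = m then [chosen]
  else if (rest.length : Int) < m - (chosen.length : Int) then []
  else match rest with
    | [] => []
    | x :: t => buildB m t (chosen ++ [x]) ++ buildB m t chosen

def select_pizza_alt (pizza_map : List (List Int)) (m : Int) : List (List (Int × Int)) :=
  let n : Int := pizza_map.length
  let cells : List (Int × Int) :=
    (PySem.List.pyRange 0 n 1).flatMap (fun i =>
      ((PySem.List.pyRange 0 n 1).filter (fun j =>
        PySem.List.pyGetD (PySem.List.pyGetD pizza_map i []) j 0 = 2)).map (fun j => (i, j)))
  buildB m cells []

-- ===== PRECONDITION & SPEC =====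
-- Pre_ excludes exactly the inputs where A raises: m < 0 (ValueError from combinations)
-- and grids with a row shorter than len(pizza_map) (IndexError on pizza_map[i][j]).
def Pre_select_pizza (pizza_map : List (List Int)) (m : Int) : Prop :=
  0 ≤ m ∧ ∀ row ∈ pizza_map, pizza_map.length ≤ row.length
instance (pizza_map : List (List Int)) (m : Int) : Decidable (Pre_select_pizza pizza_map m) := by
  unfold Pre_select_pizza; infer_instance

def pvWitness_select_pizza : List (List Int) × Int := ([[2, 0], [0, 2]], 1)

def Spec_select_pizza (pizza_map : List (List Int)) (m : Int) (out : List (List (Int × Int))) : Prop := out = select_pizza_alt pizza_map m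
instance (pizza_map : List (List Int)) (m : Int) (out : List (List (Int × Int))) : Decidable (Spec_select_pizza pizza_map m out) := by unfold Spec_select_pizza; infer_instance

-- ===== CLAIM (what is proved, stated in full; the proofs are below) =====
def Claim_equal_select_pizza : Prop := ∀ (pizza_map : List (List Int)) (m : Int), Dom_select_pizza pizza_map m → Pre_select_pizza pizza_map m → Spec_select_pizza pizza_map m (select_pizza pizza_map m)

-- ===== LEMMAS AND PROOFS =====

-- too-short suffixes yield no combinations
theorem combosA_eq_nil_of_lt {α : Type} (k : Nat) (xs : List α) (h : xs.length < k) :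
    combosA k xs = [] := by
  induction xs generalizing k with
  | nil => cases k with
    | zero => omega
    | succ k => simp [combosA]
  | cons x t ih =>
    cases k with
    | zero => omega
    | succ k =>
      simp only [combosA]
      rw [ih k (by simpa using Nat.lt_of_succ_lt_succ h), ih (k + 1) (by simp at h; omega)]
      simp

-- B's accumulator recursion computes A's combinations of the remaining count, prefixed by chosen
theorem buildB_eq_combosA (m : Int) (rest chosen : List (Int × Int))
    (h : (chosen.length : Int) ≤ m) :
    buildB m rest chosen = (combosA (m - chosen.length).toNat rest).map (fun c => chosen ++ c) := by
  induction rest generalizing chosen with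
  | nil =>
    rw [buildB]
    by_cases he : (chosen.length : Int) = m
    · simp [he, combosA]
    · have hk : 0 < (m - (chosen.length : Int)).toNat := by omega
      have : (0 : Int) < m - chosen.length := by omega
      rw [if_neg he, if_pos (by simpa using this)]
      cases hn : (m - (chosen.length : Int)).toNat with
      | zero => omega
      | succ k => simp [combosA]
  | cons x t ih =>
    rw [buildB]
    by_cases he : (chosen.length : Int) = m
    · simp [he, combosA]
    · have hlt : (chosen.length : Int) < m := lt_of_le_of_ne h he
      rw [if_neg he]
      by_cases hshort : ((x :: t).length : Int) < m - (chosen.length : Int)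
      · rw [if_pos hshort,
          combosA_eq_nil_of_lt _ _ (by simp at hshort ⊢; omega)]
        simp
      · rw [if_neg hshort]
        have hn : (m - (chosen.length : Int)).toNat = (m - ((chosen ++ [x]).length : Int)).toNat + 1 := by
          simp; omega
        rw [hn]
        simp only [combosA, List.map_append]
        rw [ih (chosen ++ [x]) (by simp; omega), ih chosen h]
        have : (m - ((chosen ++ [x]).length : Int)).toNat + 1 = (m - (chosen.length : Int)).toNat := hn.symm
        rw [this]
        congr 1
        · rw [List.map_map]
          exact List.map_congr_left (fun c _ => by simp)

-- ===== VERDICT (by name: the statement is the Claim_ definition above) =====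
theorem select_pizza_spec : Claim_equal_select_pizza := by
  intro pizza_map m _hdom hpre
  unfold Spec_select_pizza select_pizza select_pizza_alt
  simp only [PySem.List.foldl_append_ite, PySem.List.foldl_append_eq_flatMap, List.nil_append]
  rw [buildB_eq_combosA m _ [] (by exact_mod_cast hpre.1)]
  simp
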